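-- pv_equiv track=rewrite | github.com/Hugo0033-l/Activitats | Movil.py | read_mobile
-- ===== SOURCE A (Python) =====
-- def read_mobile(lines, index):
--     pi, di, pd, dd = lines[index]
--     index += 1
--     balancejat = True
--     if pi == 0:
--         pi, sub_balancejat, index = read_mobile(lines, index)
--         balancejat = balancejat and sub_balancejat
--     if pd == 0:
--         pd, sub_balancejat, index = read_mobile(lines, index)
--         balancejat = balancejat and sub_balancejat
--     if pi*di != pd*dd:
--         balancejat = False
--     pes_total = pi+pd
--     return pes_total, balancejat, index
-- ===== SOURCE B (Python) =====
-- def read_mobile(lines, index):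
--     # Iterative preorder parse with an explicit stack; a single running AND flag
--     # replaces the recursive per-node balance combination.
--     balanced = True
--     stack = []  # frames: (stage, pi, di, pd, dd); stage 0 = filling left, 1 = filling right
--     while True:
--         pi, di, pd, dd = lines[index]
--         index += 1
--         if pi == 0:
--             stack.append((0, pi, di, pd, dd))
--             continue
--         if pd == 0:
--             stack.append((1, pi, di, pd, dd))
--             continue
--         # node complete: propagate upward
--         reading = False
--         while True:
--             if pi * di != pd * dd:
--                 balanced = False
--             w = pi + pd
--             if not stack:
--                 return w, balanced, index
--             stage, spi, sdi, spd, sdd = stack.pop()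
--             if stage == 0 and spd == 0:
--                 stack.append((1, w, sdi, spd, sdd))
--                 reading = True
--                 break
--             if stage == 0:
--                 pi, di, pd, dd = w, sdi, spd, sdd
--             else:
--                 pi, di, pd, dd = spi, sdi, w, sdd
--         if reading:
--             continue
-- ===== Notes on version B (the rewrite author's own statement) =====
-- stated objective: alternative
-- what changed: Replaced the call recursion by an iterative preorder parse over an explicit stack of frames, combining subtree weights on pop and folding every node's local balance check into a single running AND flag instead of the per-node recursive combination.
import Mathlib
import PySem

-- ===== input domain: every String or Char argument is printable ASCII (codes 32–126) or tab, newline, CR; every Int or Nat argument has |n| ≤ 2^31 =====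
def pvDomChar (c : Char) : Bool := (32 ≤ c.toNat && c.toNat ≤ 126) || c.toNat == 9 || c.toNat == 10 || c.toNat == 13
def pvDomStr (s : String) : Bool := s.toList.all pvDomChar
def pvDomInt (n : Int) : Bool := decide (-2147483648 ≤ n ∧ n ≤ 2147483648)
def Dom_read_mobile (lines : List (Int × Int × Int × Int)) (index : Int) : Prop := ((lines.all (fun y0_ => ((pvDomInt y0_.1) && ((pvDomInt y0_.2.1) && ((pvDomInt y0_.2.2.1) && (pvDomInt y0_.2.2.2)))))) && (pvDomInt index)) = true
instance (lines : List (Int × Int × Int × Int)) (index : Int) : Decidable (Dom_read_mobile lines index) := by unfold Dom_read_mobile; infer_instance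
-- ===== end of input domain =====

-- B replaces A's call recursion by an iterative preorder parse over an explicit stack
-- with one running AND flag (objective: alternative decomposition, same cost).


-- ===== PORT A =====
-- A's recursion, fuel-guarded (one unit per line read; the fuel left is threaded out so
-- sibling calls resume with the remaining fuel). `none` = Python raises (IndexError).
def goA (lines : List (Int × Int × Int × Int)) : (fuel : Nat) → Int → Option ((Int × Bool × Int) × {f : Nat // f ≤ fuel})
  | 0, _ => none
  | fuel+1, index =>
    match PySem.List.pyGet? lines index with
    | none => none
    | some (pi, di, pd, dd) =>
      let index1 := index + 1
      let step1 : Option (Int × Bool × Int × {f : Nat // f ≤ fuel}) :=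
        if pi = 0 then
          match goA lines fuel index1 with
          | none => none
          | some ((w, sub, i2), f2) => some (w, true && sub, i2, f2)
        else some (pi, true, index1, ⟨fuel, Nat.le_refl _⟩)
      match step1 with
      | none => none
      | some (pi', bal1, index2, f2) =>
        let step2 : Option (Int × Bool × Int × {f : Nat // f ≤ fuel}) :=
          if pd = 0 then
            match goA lines f2.val index2 with
            | none => none
            | some ((w, sub, i3), f3) => some (w, bal1 && sub, i3, ⟨f3.val, Nat.le_trans f3.property f2.property⟩)
          else some (pd, bal1, index2, f2)
        match step2 with
        | none => none
        | some (pd', bal2, index3, f3) =>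
          let bal3 := if pi' * di ≠ pd' * dd then false else bal2
          some ((pi' + pd', bal3, index3), ⟨f3.val, Nat.le_succ_of_le f3.property⟩)
  termination_by fuel => fuel
  decreasing_by
  · omega
  · exact Nat.lt_succ_of_le f2.property

def read_mobile (lines : List (Int × Int × Int × Int)) (index : Int) : Int × Bool × Int :=
  match goA lines (2 * lines.length + 1) index with
  | none => (0, true, 0)   -- unreachable under Pre_ (Python raises there)
  | some (r, _) => r

-- ===== PORT B =====
-- B's inner while loop: propagate a completed subtree weight w up the stack,
-- ANDing each completed node's local balance check into `bal`.
-- .inl = function returns; .inr (bal', stack') = break back to reading the next line.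
def resumeB : Bool → Int → Int → List (Int × Int × Int × Int × Int) → ((Int × Bool × Int) ⊕ (Bool × List (Int × Int × Int × Int × Int)))
  | bal, w, index, [] => .inl (w, bal, index)
  | bal, w, index, (stage, spi, sdi, spd, sdd) :: rest =>
    if stage = 0 then
      if spd = 0 then .inr (bal, (1, w, sdi, spd, sdd) :: rest)
      else
        let bal' := if w * sdi ≠ spd * sdd then false else bal
        resumeB bal' (w + spd) index rest
    else
      let bal' := if spi * sdi ≠ w * sdd then false else bal
      resumeB bal' (spi + w) index rest

-- B's outer while loop: read the next line (fuel-guarded, one unit per read).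
def machB (lines : List (Int × Int × Int × Int)) : Nat → Int → Bool → List (Int × Int × Int × Int × Int) → Option (Int × Bool × Int)
  | 0, _, _, _ => none
  | fuel+1, index, bal, stack =>
    match PySem.List.pyGet? lines index with
    | none => none
    | some (pi, di, pd, dd) =>
      let index1 := index + 1
      if pi = 0 then machB lines fuel index1 bal ((0, pi, di, pd, dd) :: stack)
      else if pd = 0 then machB lines fuel index1 bal ((1, pi, di, pd, dd) :: stack)
      else
        let bal' := if pi * di ≠ pd * dd then false else bal
        match resumeB bal' (pi + pd) index1 stack with
        | .inl r => some r
        | .inr (bal2, stack2) => machB lines fuel index1 bal2 stack2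

def read_mobile_alt (lines : List (Int × Int × Int × Int)) (index : Int) : Int × Bool × Int :=
  (machB lines (2 * lines.length + 1) index true []).getD (0, true, 0)

-- ===== PRECONDITION & SPEC =====
-- Number of still-unfilled subtree slots after reading t lines starting at `index`
-- (each line fills one slot and opens one slot per zero weight).
def pendAfter (lines : List (Int × Int × Int × Int)) (index : Int) (t : Nat) : Int :=
  (List.range t).foldl
    (fun p j =>
      p - 1 +
        (match PySem.List.pyGet? lines (index + (j : Int)) with
         | some (pi, _, pd, _) => (if pi = 0 then 1 else 0) + (if pd = 0 then 1 else 0)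
         | none => 0)) 1

-- Pre_ excludes exactly the inputs on which Python A raises (IndexError: the preorder
-- scan runs past the list before every opened slot is filled): the parse succeeds iff
-- some in-range prefix of reads brings the pending-slot count from 1 down to 0.
def Pre_read_mobile (lines : List (Int × Int × Int × Int)) (index : Int) : Prop :=
  ∃ t : Nat, t ≤ 2 * lines.length ∧ 1 ≤ t ∧ -(lines.length : Int) ≤ index ∧
    index + (t : Int) ≤ (lines.length : Int) ∧ pendAfter lines index t = 0
instance (lines : List (Int × Int × Int × Int)) (index : Int) : Decidable (Pre_read_mobile lines index) := by unfold Pre_read_mobile; infer_instance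

def pvWitness_read_mobile : (List (Int × Int × Int × Int)) × Int := ([(1, 2, 2, 1)], 0)

def Spec_read_mobile (lines : List (Int × Int × Int × Int)) (index : Int) (out : Int × Bool × Int) : Prop := out = read_mobile_alt lines index
instance (lines : List (Int × Int × Int × Int)) (index : Int) (out : Int × Bool × Int) : Decidable (Spec_read_mobile lines index out) := by unfold Spec_read_mobile; infer_instance

-- ===== CLAIM (what is proved, stated in full; the proofs are below) =====
def Claim_equal_read_mobile : Prop := ∀ (lines : List (Int × Int × Int × Int)) (index : Int), Dom_read_mobile lines index → Pre_read_mobile lines index → Spec_read_mobile lines index (read_mobile lines index)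

-- ===== LEMMAS AND PROOFS =====

-- Simulation: B's machine run from any state equals A's recursion followed by
-- propagation of its result into the stack (strong induction on the fuel).
theorem machB_eq_goA (lines : List (Int × Int × Int × Int)) :
    ∀ fuel index bal stack,
      machB lines fuel index bal stack =
        match goA lines fuel index with
        | none => none
        | some ((w, b, i'), f') =>
          match resumeB (bal && b) w i' stack with
          | .inl r => some r
          | .inr (bal2, stack2) => machB lines f'.val i' bal2 stack2 := by
  intro fuel
  induction fuel using Nat.strong_induction_on with
  | _ fuel IH =>
  match fuel with
  | 0 => intro index bal stack; simp [machB, goA]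
  | Nat.succ n =>
    intro index bal stack
    rw [machB, goA]
    cases hg : PySem.List.pyGet? lines index with
    | none => simp
    | some q =>
      obtain ⟨pi, di, pd, dd⟩ := q
      simp only
      by_cases hpi : pi = 0
      · subst hpi
        simp only [if_true]
        rw [IH n (Nat.lt_succ_self n) (index+1) bal ((0, 0, di, pd, dd) :: stack)]
        cases h1 : goA lines n (index+1) with
        | none => simp
        | some r1 =>
          obtain ⟨⟨w1, b1, i2⟩, f2⟩ := r1
          simp only [resumeB, if_true]
          by_cases hpd : pd = 0
          · subst hpd
            simp only [if_true]
            rw [IH f2.val (Nat.lt_succ_of_le f2.property) i2 (bal && b1) ((1, w1, di, 0, dd) :: stack)]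
            cases h2 : goA lines f2.val i2 with
            | none => simp
            | some r2 =>
              obtain ⟨⟨w2, b2, i3⟩, f3⟩ := r2
              simp only [resumeB]
              rw [if_neg (show ¬(1:Int) = 0 by decide)]
              have hb : (if w1 * di ≠ w2 * dd then false else (bal && b1) && b2)
                  = (bal && (if w1 * di ≠ w2 * dd then false else (true && b1) && b2)) := by
                cases bal <;> cases b1 <;> cases b2 <;> by_cases hc : w1 * di = w2 * dd <;> simp [hc]
              rw [hb]
          · simp only [if_neg hpd]
            have hb : (if w1 * di ≠ pd * dd then false else bal && b1)
                = (bal && (if w1 * di ≠ pd * dd then false else true && b1)) := by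
              cases bal <;> cases b1 <;> by_cases hc : w1 * di = pd * dd <;> simp [hc]
            rw [hb]
      · simp only [if_neg hpi]
        by_cases hpd : pd = 0
        · subst hpd
          simp only [if_true]
          rw [IH n (Nat.lt_succ_self n) (index+1) bal ((1, pi, di, 0, dd) :: stack)]
          cases h2 : goA lines n (index+1) with
          | none => simp
          | some r2 =>
            obtain ⟨⟨w2, b2, i3⟩, f3⟩ := r2
            simp only [resumeB]
            rw [if_neg (show ¬(1:Int) = 0 by decide)]
            have hb : (if pi * di ≠ w2 * dd then false else bal && b2)
                = (bal && (if pi * di ≠ w2 * dd then false else true && b2)) := by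
              cases bal <;> cases b2 <;> by_cases hc : pi * di = w2 * dd <;> simp [hc]
            rw [hb]
        · simp only [if_neg hpd]
          have hb : (if pi * di ≠ pd * dd then false else bal)
              = (bal && (if pi * di ≠ pd * dd then false else true)) := by
            cases bal <;> by_cases hc : pi * di = pd * dd <;> simp [hc]
          rw [hb]

-- ===== VERDICT (by name: the statement is the Claim_ definition above) =====
theorem read_mobile_spec : Claim_equal_read_mobile := by
  intro lines index _ _
  unfold Spec_read_mobile read_mobile read_mobile_alt
  rw [machB_eq_goA]
  cases h : goA lines (2 * lines.length + 1) index with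
  | none => rfl
  | some r =>
    obtain ⟨⟨w, b, i'⟩, f⟩ := r
    simp [resumeB]
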